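-- pv_equiv track=rewrite | github.com/ramizik/stealthD | analytics/player_ball_assigner.py | get_player_touch_frames
-- ===== SOURCE A (Python) =====
-- from typing import Dict, Optional, Tuple
--
-- def get_player_touch_frames(ball_assignments: Dict) -> Dict[int, list]:
--     """
--     Get list of frames where each player touched the ball.
--
--     Args:
--         ball_assignments: Dictionary {frame_idx: player_id}
--
--     Returns:
--         Dictionary {player_id: [frame_idx1, frame_idx2, ...]}
--     """
--     touch_frames = {}
--     prev_player = None
--
--     # Sort frames to process in order
--     sorted_frames = sorted(ball_assignments.keys())
--
--     for frame_idx in sorted_frames: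
--         current_player = ball_assignments[frame_idx]
--
--         # Record touch frame when ball is assigned to a different player
--         if current_player != prev_player and current_player is not None:
--             if current_player not in touch_frames:
--                 touch_frames[current_player] = []
--             touch_frames[current_player].append(int(frame_idx))
--
--         prev_player = current_player
--
--     return touch_frames
-- ===== SOURCE B (Python) =====
-- def get_player_touch_frames(ball_assignments):
--     """Run-chopping rewrite: sort the items once, chop maximal runs of equal
--     player, and record the first frame of each non-None run."""
--     items = sorted(ball_assignments.items(), key=lambda kv: kv[0])
--     touch_frames = {}
--     i = 0
--     n = len(items)
--     while i < n:
--         frame, player = items[i]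
--         j = i + 1
--         while j < n and items[j][1] == player:
--             j += 1
--         if player is not None:
--             touch_frames.setdefault(player, []).append(int(frame))
--         i = j
--     return touch_frames
-- ===== Notes on version B (the rewrite author's own statement) =====
-- stated objective: alternative
-- what changed: Replaces A's prev-player state tracking across the sorted frames by sorting the items once and chopping them into maximal runs of equal player with an index/inner-while scan, recording the first frame of each non-None run.
import Mathlib
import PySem

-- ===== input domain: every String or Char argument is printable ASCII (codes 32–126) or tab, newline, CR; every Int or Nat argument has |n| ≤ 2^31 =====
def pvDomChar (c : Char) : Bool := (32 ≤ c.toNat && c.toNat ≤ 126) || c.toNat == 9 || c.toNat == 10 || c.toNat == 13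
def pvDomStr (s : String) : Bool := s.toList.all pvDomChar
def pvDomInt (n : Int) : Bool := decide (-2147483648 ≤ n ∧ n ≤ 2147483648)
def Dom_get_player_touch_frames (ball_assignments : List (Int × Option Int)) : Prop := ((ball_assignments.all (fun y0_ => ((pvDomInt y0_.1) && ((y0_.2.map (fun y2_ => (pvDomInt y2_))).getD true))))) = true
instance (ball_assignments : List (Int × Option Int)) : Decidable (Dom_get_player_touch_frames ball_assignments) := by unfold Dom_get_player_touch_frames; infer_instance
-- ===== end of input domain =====

-- B replaces A's prev-player state tracking by sort-once run chopping (record the first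
-- frame of each maximal run of equal player); objective: alternative decomposition, same cost.

-- ===== PORT A =====
-- A's "if current not in touch_frames: …[current] = []" followed by ".append(int(frame_idx))"
def pvRecordA (tf : PySem.Dict Int (List Int)) (p : Int) (f : Int) : PySem.Dict Int (List Int) :=
  let tf1 := if tf.contains p then tf else tf.insert p []
  tf1.modify p [] (fun l => l ++ [f])

def get_player_touch_frames (ball_assignments : List (Int × Option Int)) : List (Int × List Int) :=
  let d := PySem.Dict.ofList ball_assignments
  let sorted_frames := PySem.List.sorted d.keys (fun k => k) false
  (sorted_frames.foldl
    (fun st frame_idx =>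
      -- frame_idx ∈ d.keys, so Python's d[frame_idx] never raises; the getD default is unreachable
      let current := d.getD frame_idx none
      (if current ≠ st.2 ∧ current ≠ none then
        match current with
        | some p => pvRecordA st.1 p frame_idx
        | none => st.1
       else st.1, current))
    ((PySem.Dict.empty : PySem.Dict Int (List Int)), (none : Option Int))).1.items

-- ===== PORT B =====
-- the first (frame, player) pair of each maximal run of equal player (Source B's outer/inner while loops)
def pvChopRuns : List (Int × Option Int) → List (Int × Option Int)
  | [] => []
  | x :: xs => x :: pvChopRuns (xs.dropWhile (fun y => y.2 == x.2))
termination_by l => l.length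
decreasing_by exact Nat.lt_of_le_of_lt (List.length_dropWhile_le _ _) (by simp)

def get_player_touch_frames_alt (ball_assignments : List (Int × Option Int)) : List (Int × List Int) :=
  let items := PySem.List.sorted (PySem.Dict.ofList ball_assignments).items (fun kv => kv.1) false
  ((pvChopRuns items).foldl
    (fun tf x =>
      match x.2 with
      | some p => (tf.setdefault p []).modify p [] (fun l => l ++ [x.1])
      | none => tf)
    (PySem.Dict.empty : PySem.Dict Int (List Int))).items

-- ===== PRECONDITION & SPEC =====
def Spec_get_player_touch_frames (ball_assignments : List (Int × Option Int)) (out : List (Int × List Int)) : Prop := out = get_player_touch_frames_alt ball_assignments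
instance (ball_assignments : List (Int × Option Int)) (out : List (Int × List Int)) : Decidable (Spec_get_player_touch_frames ball_assignments out) := by unfold Spec_get_player_touch_frames; infer_instance

-- ===== CLAIM (what is proved, stated in full; the proofs are below) =====
def Claim_equal_get_player_touch_frames : Prop := ∀ (ball_assignments : List (Int × Option Int)), Dom_get_player_touch_frames ball_assignments → Spec_get_player_touch_frames ball_assignments (get_player_touch_frames ball_assignments)

-- ===== LEMMAS AND PROOFS =====

-- A's loop body, seen as a step over (frame, player) pairs
def pvStepA (st : PySem.Dict Int (List Int) × Option Int) (x : Int × Option Int) :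
    PySem.Dict Int (List Int) × Option Int :=
  (if x.2 ≠ st.2 ∧ x.2 ≠ none then
    match x.2 with
    | some p => pvRecordA st.1 p x.1
    | none => st.1
   else st.1, x.2)

-- B's loop body
def pvStepB (tf : PySem.Dict Int (List Int)) (x : Int × Option Int) : PySem.Dict Int (List Int) :=
  match x.2 with
  | some p => (tf.setdefault p []).modify p [] (fun l => l ++ [x.1])
  | none => tf

lemma pvRecord_eq (tf : PySem.Dict Int (List Int)) (p f : Int) :
    pvRecordA tf p f = (tf.setdefault p []).modify p [] (fun l => l ++ [f]) := by
  unfold pvRecordA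
  cases h : tf.contains p with
  | true => rw [PySem.Dict.setdefault_of_contains tf ([] : List Int) h]; simp
  | false => rw [PySem.Dict.setdefault_of_not_contains tf ([] : List Int) h]; simp

lemma pvStepA_eq (tf : PySem.Dict Int (List Int)) (prev : Option Int) (x : Int × Option Int)
    (h : x.2 = none ∨ x.2 ≠ prev) : pvStepA (tf, prev) x = (pvStepB tf x, x.2) := by
  unfold pvStepA pvStepB
  cases hx : x.2 with
  | none => simp
  | some p =>
    have hne : (some p : Option Int) ≠ prev := by
      rcases h with h | h
      · rw [hx] at h; cases h
      · rw [hx] at h; exact h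
    simp [hne, pvRecord_eq]

lemma pvSkipRun (r : List (Int × Option Int)) (tf : PySem.Dict Int (List Int)) (v : Option Int)
    (h : ∀ y ∈ r, y.2 = v) : r.foldl pvStepA (tf, v) = (tf, v) := by
  induction r with
  | nil => rfl
  | cons y ys ih =>
    have hy : y.2 = v := h y List.mem_cons_self
    have hstep : pvStepA (tf, v) y = (tf, v) := by unfold pvStepA; simp [hy]
    rw [List.foldl_cons, hstep]
    exact ih (fun z hz => h z (List.mem_cons_of_mem _ hz))

-- main invariant: A's prev-tracking fold equals B's fold over the run-first elements,
-- whenever prev differs from the head's player (or that player is None)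
lemma pvMain : ∀ (n : Nat) (l : List (Int × Option Int)), l.length ≤ n →
    ∀ (tf : PySem.Dict Int (List Int)) (prev : Option Int),
    (∀ x ∈ l.head?, x.2 = none ∨ x.2 ≠ prev) →
    (l.foldl pvStepA (tf, prev)).1 = (pvChopRuns l).foldl pvStepB tf := by
  intro n
  induction n with
  | zero =>
    intro l hl tf prev _
    have hnil : l = [] := List.eq_nil_of_length_eq_zero (Nat.le_zero.mp hl)
    subst hnil; simp [pvChopRuns]
  | succ n ih =>
    intro l hl tf prev hhead
    cases l with
    | nil => simp [pvChopRuns]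
    | cons x xs =>
      have hx := hhead x (by simp)
      rw [pvChopRuns]
      have hsplit : xs = xs.takeWhile (fun y => y.2 == x.2) ++ xs.dropWhile (fun y => y.2 == x.2) :=
        (List.takeWhile_append_dropWhile).symm
      rw [List.foldl_cons, pvStepA_eq tf prev x hx, List.foldl_cons]
      conv_lhs => rw [hsplit]
      rw [List.foldl_append]
      have hrun : (xs.takeWhile (fun y => y.2 == x.2)).foldl pvStepA (pvStepB tf x, x.2)
          = (pvStepB tf x, x.2) := by
        apply pvSkipRun
        intro y hy
        have hq := List.mem_takeWhile_imp hy
        simpa using hq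
      rw [hrun]
      apply ih
      · exact Nat.le_trans (List.length_dropWhile_le _ _) (Nat.le_of_succ_le_succ (by simpa using hl))
      · intro y hy
        right
        cases hdw : xs.dropWhile (fun y => y.2 == x.2) with
        | nil => rw [hdw] at hy; cases hy
        | cons z zs =>
          rw [hdw] at hy
          have hyz : y = z := by have h := hy; simp at h; exact h.symm
          subst hyz
          have h0 : 0 < (xs.dropWhile (fun y => y.2 == x.2)).length := by rw [hdw]; simp
          have hnq := List.dropWhile_get_zero_not (fun y => y.2 == x.2) xs h0
          simp [hdw] at hnq
          exact hnq

-- ===== VERDICT (by name: the statement is the Claim_ definition above) =====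
theorem get_player_touch_frames_spec : Claim_equal_get_player_touch_frames := by
  intro ba _
  unfold Spec_get_player_touch_frames get_player_touch_frames get_player_touch_frames_alt
  have hnodup : (PySem.Dict.ofList ba).keys.Nodup := PySem.Dict.nodup_keys_ofList ba
  have hitems : PySem.List.sorted (PySem.Dict.ofList ba).items (fun kv => kv.1) false
      = (PySem.List.sorted (PySem.Dict.ofList ba).keys (fun k => k) false).map
          (fun k => (k, (PySem.Dict.ofList ba).getD k none)) := by
    apply PySem.List.sorted_eq_of_perm_of_pairwise_lt
    · rw [PySem.Dict.items_eq_map_keys (PySem.Dict.ofList ba) hnodup none]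
      exact List.Perm.map _ (PySem.List.sorted_perm _ _ _)
    · rw [List.pairwise_map]
      have h1 := PySem.List.sorted_pairwise (PySem.Dict.ofList ba).keys (fun k => k)
      have h2 : (PySem.List.sorted (PySem.Dict.ofList ba).keys (fun k => k) false).Nodup :=
        (List.Perm.nodup_iff (PySem.List.sorted_perm _ _ _)).mpr hnodup
      exact (h1.and h2).imp (fun hab => lt_of_le_of_ne hab.1 hab.2)
  rw [hitems]
  have hfold : (PySem.List.sorted (PySem.Dict.ofList ba).keys (fun k => k) false).foldl
      (fun st frame_idx =>
        let current := (PySem.Dict.ofList ba).getD frame_idx none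
        (if current ≠ st.2 ∧ current ≠ none then
          match current with
          | some p => pvRecordA st.1 p frame_idx
          | none => st.1
         else st.1, current))
      ((PySem.Dict.empty : PySem.Dict Int (List Int)), (none : Option Int))
      = ((PySem.List.sorted (PySem.Dict.ofList ba).keys (fun k => k) false).map
          (fun k => (k, (PySem.Dict.ofList ba).getD k none))).foldl pvStepA
          ((PySem.Dict.empty : PySem.Dict Int (List Int)), (none : Option Int)) := by
    rw [List.foldl_map]
    rfl
  simp only []
  rw [hfold]
  congr 1
  apply pvMain _ _ (Nat.le_refl _)
  intro x _
  by_cases hx : x.2 = none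
  · exact Or.inl hx
  · exact Or.inr hx
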